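-- pv_equiv track=rewrite | github.com/tergolina/MarketSimulator | server.py | filter_blueprint
-- ===== SOURCE A (Python) =====
-- from copy import copy, deepcopy
--
-- def filter_blueprint(blueprint):
--     bp = deepcopy(blueprint)
--     if ('maker' in bp) and ('trade' in bp):
--         for exchange in bp['maker']:
--             for pair in bp['maker'][exchange]:
--                 if (exchange in bp['trade']) and (pair in bp['trade'][exchange]):
--                     bp['trade'][exchange].remove(pair)
--     if ('taker' in bp) and ('quote' in bp):
--         for exchange in bp['taker']:
--             for pair in bp['taker'][exchange]:
--                 if (exchange in bp['quote']) and (pair in bp['quote'][exchange]):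
--                     bp['quote'][exchange].remove(pair)
--     return bp
-- ===== SOURCE B (Python) =====
-- from copy import deepcopy
--
-- def _purge(target, counts):
--     # one pass: drop the first occurrences of each pair while its count lasts
--     kept = []
--     for p in target:
--         c = counts.get(p, 0)
--         if c > 0:
--             counts[p] = c - 1
--         else:
--             kept.append(p)
--     return kept
--
-- def _strip(bp, src_key, dst_key):
--     if src_key not in bp or dst_key not in bp:
--         return
--     src = bp[src_key]
--     dst = bp[dst_key]
--     for exchange in list(dst):
--         if exchange in src:
--             counts = {}
--             for p in src[exchange]:
--                 counts[p] = counts.get(p, 0) + 1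
--             dst[exchange] = _purge(dst[exchange], counts)
--
-- def filter_blueprint(blueprint):
--     bp = deepcopy(blueprint)
--     _strip(bp, 'maker', 'trade')
--     _strip(bp, 'taker', 'quote')
--     return bp
-- ===== Notes on version B (the rewrite author's own statement) =====
-- stated objective: faster
-- what changed: A removes each maker/taker pair from the trade/quote list with a repeated list.remove scan (quadratic per exchange); B counts the pairs to drop per exchange once and rebuilds each target list in a single pass, preserving order and duplicate semantics.
import Mathlib
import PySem

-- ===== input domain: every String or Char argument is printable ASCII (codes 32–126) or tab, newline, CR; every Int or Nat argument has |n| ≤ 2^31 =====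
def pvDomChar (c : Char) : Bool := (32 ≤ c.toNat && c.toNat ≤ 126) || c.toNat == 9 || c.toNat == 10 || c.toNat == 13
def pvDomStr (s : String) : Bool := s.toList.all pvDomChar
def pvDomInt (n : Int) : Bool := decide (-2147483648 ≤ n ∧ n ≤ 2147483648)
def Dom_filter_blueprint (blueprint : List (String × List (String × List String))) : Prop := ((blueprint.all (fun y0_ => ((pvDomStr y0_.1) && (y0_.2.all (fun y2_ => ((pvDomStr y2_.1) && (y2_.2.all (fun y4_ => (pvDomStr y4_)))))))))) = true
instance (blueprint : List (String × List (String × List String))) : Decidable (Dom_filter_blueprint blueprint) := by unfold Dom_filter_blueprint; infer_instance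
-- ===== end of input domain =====

-- B replaces A's repeated `list.remove` scans by a per-exchange count of the pairs to drop
-- and one rebuild pass over each target list (return value only; A never mutates its argument).

-- shared dict-as-association-list helpers (first-match lookup, update first matching entry)
def pvGetA {α : Type} (d : List (String × α)) (k : String) : Option α :=
  match d with
  | [] => none
  | (k', v) :: t => if k' = k then some v else pvGetA t k

def pvHasA {α : Type} (d : List (String × α)) (k : String) : Bool :=
  (pvGetA d k).isSome

def pvUpd {α : Type} (d : List (String × α)) (k : String) (f : α → α) : List (String × α) :=
  match d with
  | [] => []
  | (k', v) :: t => if k' = k then (k', f v) :: t else (k', v) :: pvUpd t k f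

-- ===== PORT A =====
-- one `if (src in bp) and (dst in bp): for exchange in bp[src]: for pair in bp[src][exchange]: …` block of A
def filterPassA (bp : List (String × List (String × List String))) (src dst : String) :
    List (String × List (String × List String)) :=
  if pvHasA bp src && pvHasA bp dst then
    (((pvGetA bp src).getD []).map (·.1)).foldl (fun bp exchange =>
      ((pvGetA ((pvGetA bp src).getD []) exchange).getD []).foldl (fun bp pair =>
        if pvHasA ((pvGetA bp dst).getD []) exchange &&
           ((pvGetA ((pvGetA bp dst).getD []) exchange).getD []).contains pair then
          -- bp[dst][exchange].remove(pair): the guard guarantees membership, so this is List.erase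
          pvUpd bp dst (fun td => pvUpd td exchange (fun l => l.erase pair))
        else bp) bp) bp
  else bp

def filter_blueprint (blueprint : List (String × List (String × List String))) :
    List (String × List (String × List String)) :=
  filterPassA (filterPassA blueprint "maker" "trade") "taker" "quote"

-- ===== PORT B =====
-- counts[p] = counts.get(p, 0) + 1 loop
def countB (ps : List String) : PySem.Dict String Int :=
  ps.foldl (fun d p => d.insert p (d.getD p 0 + 1)) PySem.Dict.empty

-- single rebuild pass: drop each pair while its count lasts, keep the rest
def purgeB : List String → PySem.Dict String Int → List String
  | [], _ => []
  | p :: t, counts =>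
    let c := counts.getD p 0
    if c > 0 then purgeB t (counts.insert p (c - 1)) else p :: purgeB t counts

def stripB (bp : List (String × List (String × List String))) (src dst : String) :
    List (String × List (String × List String)) :=
  match pvGetA bp src, pvGetA bp dst with
  | some s, some t =>
      pvUpd bp dst (fun _ => t.map (fun el =>
        match pvGetA s el.1 with
        | some ps => (el.1, purgeB el.2 (countB ps))
        | none => el))
  | _, _ => bp

def filter_blueprint_alt (blueprint : List (String × List (String × List String))) :
    List (String × List (String × List String)) :=
  stripB (stripB blueprint "maker" "trade") "taker" "quote"

-- ===== PRECONDITION & SPEC =====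
-- Pre_ excludes association lists with a duplicated key (at top level or inside any exchange
-- dict): such lists cannot arise from a Python dict, so A's first-match behaviour on them is
-- a representation accident.
def Pre_filter_blueprint (blueprint : List (String × List (String × List String))) : Prop :=
  (blueprint.map (·.1)).Nodup ∧ ∀ p ∈ blueprint, (p.2.map (·.1)).Nodup

instance (blueprint : List (String × List (String × List String))) : Decidable (Pre_filter_blueprint blueprint) := by
  unfold Pre_filter_blueprint; infer_instance

def pvWitness_filter_blueprint : (List (String × List (String × List String))) :=
  [("maker", [("X", ["a"])]), ("trade", [("X", ["a", "b", "a"]), ("Y", ["a"])])]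

def Spec_filter_blueprint (blueprint : List (String × List (String × List String))) (out : List (String × List (String × List String))) : Prop := out = filter_blueprint_alt blueprint
instance (blueprint : List (String × List (String × List String))) (out : List (String × List (String × List String))) : Decidable (Spec_filter_blueprint blueprint out) := by unfold Spec_filter_blueprint; infer_instance

-- ===== CLAIM (what is proved, stated in full; the proofs are below) =====
def Claim_equal_filter_blueprint : Prop := ∀ (blueprint : List (String × List (String × List String))), Dom_filter_blueprint blueprint → Pre_filter_blueprint blueprint → Spec_filter_blueprint blueprint (filter_blueprint blueprint)

-- ===== LEMMAS AND PROOFS =====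

lemma pvGetA_pvUpd {α : Type} (d : List (String × α)) (k k' : String) (f : α → α) :
    pvGetA (pvUpd d k f) k' = if k' = k then (pvGetA d k).map f else pvGetA d k' := by
  induction d with
  | nil => simp [pvUpd, pvGetA]
  | cons hd tl ih =>
    obtain ⟨k0, v0⟩ := hd
    by_cases h1 : k0 = k
    · subst h1
      by_cases h2 : k0 = k'
      · subst h2; simp [pvUpd, pvGetA]
      · have h3 : k' ≠ k0 := fun h => h2 h.symm
        simp [pvUpd, pvGetA, h2, h3]
    · by_cases h2 : k0 = k'
      · subst h2
        simp [pvUpd, pvGetA, h1]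
      · simp [pvUpd, pvGetA, h1, h2, ih]

lemma pvUpd_pvUpd {α : Type} (d : List (String × α)) (k : String) (f g : α → α) :
    pvUpd (pvUpd d k f) k g = pvUpd d k (fun v => g (f v)) := by
  induction d with
  | nil => simp [pvUpd]
  | cons hd tl ih =>
    obtain ⟨k0, v0⟩ := hd
    by_cases h1 : k0 = k <;> simp [pvUpd, h1, ih]

lemma pvUpd_of_get_none {α : Type} (d : List (String × α)) (k : String) (f : α → α)
    (h : pvGetA d k = none) : pvUpd d k f = d := by
  induction d with
  | nil => simp [pvUpd]
  | cons hd tl ih =>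
    obtain ⟨k0, v0⟩ := hd
    by_cases h1 : k0 = k <;> simp_all [pvUpd, pvGetA]

lemma pvUpd_eq_self {α : Type} (d : List (String × α)) (k : String) (f : α → α)
    (h : ∀ v, pvGetA d k = some v → f v = v) : pvUpd d k f = d := by
  induction d with
  | nil => simp [pvUpd]
  | cons hd tl ih =>
    obtain ⟨k0, v0⟩ := hd
    by_cases h1 : k0 = k
    · simp [pvUpd, h1, h v0 (by simp [pvGetA, h1])]
    · simp only [pvUpd, if_neg h1, List.cons.injEq, true_and]
      exact ih (fun v hv => h v (by simp [pvGetA, h1, hv]))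

lemma keys_pvUpd {α : Type} (d : List (String × α)) (k : String) (f : α → α) :
    (pvUpd d k f).map (·.1) = d.map (·.1) := by
  induction d with
  | nil => simp [pvUpd]
  | cons hd tl ih =>
    obtain ⟨k0, v0⟩ := hd
    by_cases h1 : k0 = k <;> simp [pvUpd, h1, ih]

lemma mem_of_pvGetA {α : Type} (d : List (String × α)) (k : String) (v : α)
    (h : pvGetA d k = some v) : (k, v) ∈ d := by
  induction d with
  | nil => simp [pvGetA] at h
  | cons hd tl ih =>
    obtain ⟨k0, v0⟩ := hd
    rw [pvGetA] at h
    by_cases h1 : k0 = k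
    · simp only [if_pos h1, Option.some.injEq] at h
      exact List.mem_cons.mpr (Or.inl (by rw [h1, h]))
    · exact List.mem_cons.mpr (Or.inr (ih (by simpa [h1] using h)))

lemma pvGetA_of_mem_nodup {α : Type} (d : List (String × α)) (k : String) (v : α)
    (hnd : (d.map (·.1)).Nodup) (h : (k, v) ∈ d) : pvGetA d k = some v := by
  induction d with
  | nil => simp at h
  | cons hd tl ih =>
    obtain ⟨k0, v0⟩ := hd
    simp only [List.map_cons, List.nodup_cons] at hnd
    rcases List.mem_cons.mp h with h | h
    · obtain ⟨h1, h2⟩ := Prod.mk.injEq .. ▸ h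
      subst h1 h2
      simp [pvGetA]
    · have hk : k0 ≠ k := by
        intro rfl'
        exact hnd.1 (by simpa [rfl'] using List.mem_map_of_mem (f := (·.1)) h)
      simp [pvGetA, hk, ih hnd.2 h]

lemma pvUpd_eq_map {α : Type} (d : List (String × α)) (k : String) (f : α → α)
    (hnd : (d.map (·.1)).Nodup) :
    pvUpd d k f = d.map (fun el => if el.1 = k then (k, f el.2) else el) := by
  induction d with
  | nil => simp [pvUpd]
  | cons hd tl ih =>
    obtain ⟨k0, v0⟩ := hd
    simp only [List.map_cons, List.nodup_cons] at hnd
    by_cases h1 : k0 = k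
    · subst h1
      have htl : ∀ el ∈ tl, (if el.1 = k0 then (k0, f el.2) else el) = id el := by
        intro el hel
        have hne : ¬ el.1 = k0 := fun he => hnd.1 (he ▸ List.mem_map_of_mem (f := (·.1)) hel)
        simp [hne]
      simp only [pvUpd, List.map_cons]
      simp only [if_true]
      rw [List.map_congr_left htl, List.map_id]
    · simp [pvUpd, h1, ih hnd.2]

-- the counter pass drops, per value, its count's worth of first occurrences: it is List.diff
lemma purgeB_diff (l : List String) (d : PySem.Dict String Int) (ps : List String)
    (h : ∀ v, d.getD v 0 = (ps.count v : Int)) : purgeB l d = l.diff ps := by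
  induction l generalizing d ps with
  | nil => simp [purgeB, List.nil_diff]
  | cons p t ih =>
    have hc := h p
    by_cases hp : p ∈ ps
    · have hpos : d.getD p 0 > 0 := by
        rw [hc]; exact_mod_cast List.count_pos_iff.mpr hp
      simp only [purgeB]
      rw [if_pos hpos, List.cons_diff_of_mem hp]
      refine ih _ (ps.erase p) (fun v => ?_)
      rw [PySem.Dict.getD_insert]
      by_cases hv : v = p
      · subst hv
        simp only [hc, List.count_erase_self]
        have : 1 ≤ ps.count v := List.count_pos_iff.mpr hp
        push_cast [Nat.cast_sub this]
        ring
      · simp [hv, h v, List.count_erase_of_ne hv]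
    · have hzero : d.getD p 0 = 0 := by
        rw [hc]; simp [List.count_eq_zero_of_not_mem hp]
      simp only [purgeB]
      rw [if_neg (by rw [hzero]; exact lt_irrefl 0), List.cons_diff_of_not_mem hp, ih d ps h]

lemma purgeB_countB (l ps : List String) : purgeB l (countB ps) = l.diff ps := by
  refine purgeB_diff l (countB ps) ps (fun v => ?_)
  have : countB ps = PySem.Dict.counter ps := PySem.Dict.foldl_insert_getD_add_one_eq_counter ps
  rw [this, PySem.Dict.getD_counter]

-- a fold of updates at one fixed key is one update by the folded function
lemma foldl_pvUpd {α β : Type} (l : List β) (d : List (String × α)) (k : String) (F : β → α → α) :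
    l.foldl (fun d x => pvUpd d k (F x)) d = pvUpd d k (fun v => l.foldl (fun v x => F x v) v) := by
  induction l generalizing d with
  | nil =>
    simp only [List.foldl_nil]
    exact (pvUpd_eq_self d k _ (fun v _ => rfl)).symm
  | cons x t ih =>
    simp only [List.foldl_cons]
    rw [ih, pvUpd_pvUpd]


lemma pvGetA_cons {α : Type} (k0 k : String) (v0 : α) (t : List (String × α)) :
    pvGetA ((k0, v0) :: t) k = if k0 = k then some v0 else pvGetA t k := rfl

lemma pvGetA_none_of_not_mem {α : Type} (d : List (String × α)) (k : String)
    (h : k ∉ d.map (·.1)) : pvGetA d k = none := by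
  cases hv : pvGetA d k with
  | none => rfl
  | some v => exact absurd (List.mem_map_of_mem (f := (·.1)) (mem_of_pvGetA d k v hv)) h

lemma pvUpd_congr_get {α : Type} (d : List (String × α)) (k : String) (f : α → α) (v : α)
    (h : pvGetA d k = some v) : pvUpd d k f = pvUpd d k (fun _ => f v) := by
  induction d with
  | nil => simp [pvUpd]
  | cons hd tl ih =>
    obtain ⟨k0, v0⟩ := hd
    rw [pvGetA] at h
    by_cases h1 : k0 = k
    · simp only [if_pos h1, Option.some.injEq] at h
      simp [pvUpd, h1, h]
    · simp only [if_neg h1] at h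
      simp [pvUpd, h1, ih h]

-- the guarded remove step of A is an unconditional two-level update (erase is id when absent)
lemma stepPair_eq (bp : List (String × List (String × List String))) (dst e pair : String) :
    (if pvHasA ((pvGetA bp dst).getD []) e &&
        ((pvGetA ((pvGetA bp dst).getD []) e).getD []).contains pair then
       pvUpd bp dst (fun td => pvUpd td e (fun l => l.erase pair))
     else bp)
    = pvUpd bp dst (fun td => pvUpd td e (fun l => l.erase pair)) := by
  cases htd : pvGetA bp dst with
  | none =>
    simp only [Option.getD_none]
    rw [if_neg (by simp [pvHasA, pvGetA])]
    exact (pvUpd_of_get_none bp dst _ htd).symm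
  | some td =>
    simp only [Option.getD_some, pvHasA]
    by_cases hl : ∃ l, pvGetA td e = some l ∧ pair ∈ l
    · obtain ⟨l, hl1, hl2⟩ := hl
      rw [if_pos (by simp [hl1, hl2])]
    · have hguard : ¬ ((pvGetA td e).isSome && ((pvGetA td e).getD []).contains pair) = true := by
        simp only [Bool.and_eq_true, Option.isSome_iff_exists]
        rintro ⟨⟨l, hleq⟩, hcont⟩
        rw [hleq] at hcont
        simp only [Option.getD_some] at hcont
        exact hl ⟨l, hleq, by simpa using hcont⟩
      rw [if_neg hguard]
      refine (pvUpd_eq_self bp dst _ ?_).symm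
      intro v hv
      rw [htd] at hv; cases hv
      refine pvUpd_eq_self td e _ ?_
      intro w hw
      exact List.erase_of_not_mem (fun hmem => hl ⟨w, hw, hmem⟩)

-- one exchange iteration of A, assuming the source dict currently reads S
lemma stepExchange_eq (bp : List (String × List (String × List String))) (src dst e : String)
    (S : List (String × List String)) (hs : pvGetA bp src = some S) :
    ((pvGetA ((pvGetA bp src).getD []) e).getD []).foldl (fun bp pair =>
        if pvHasA ((pvGetA bp dst).getD []) e &&
           ((pvGetA ((pvGetA bp dst).getD []) e).getD []).contains pair then
          pvUpd bp dst (fun td => pvUpd td e (fun l => l.erase pair))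
        else bp) bp
    = pvUpd bp dst (fun td => pvUpd td e (fun l => l.diff ((pvGetA S e).getD []))) := by
  rw [hs]
  simp only [Option.getD_some]
  have h1 : ((pvGetA S e).getD []).foldl (fun bp pair =>
        if pvHasA ((pvGetA bp dst).getD []) e &&
           ((pvGetA ((pvGetA bp dst).getD []) e).getD []).contains pair then
          pvUpd bp dst (fun td => pvUpd td e (fun l => l.erase pair))
        else bp) bp
      = ((pvGetA S e).getD []).foldl (fun bp pair =>
          pvUpd bp dst (fun td => pvUpd td e (fun l => l.erase pair))) bp := by
    apply PySem.List.foldl_congr_mem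
    intro acc x _
    exact stepPair_eq acc dst e x
  rw [h1, foldl_pvUpd]
  have h2 : ∀ td : List (String × List String),
      ((pvGetA S e).getD []).foldl (fun td pair => pvUpd td e (fun l => l.erase pair)) td
      = pvUpd td e (fun l => l.diff ((pvGetA S e).getD [])) := by
    intro td
    rw [foldl_pvUpd]
    refine congrArg _ (funext fun l => ?_)
    rw [List.diff_eq_foldl]
  exact congrArg _ (funext h2)

-- the whole exchange loop of A collapses to one update of the dst entry
lemma passLoop_eq (keys : List String) (bp : List (String × List (String × List String)))
    (src dst : String) (S : List (String × List String))
    (hne : src ≠ dst) (hs : pvGetA bp src = some S) :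
    keys.foldl (fun bp exchange =>
      ((pvGetA ((pvGetA bp src).getD []) exchange).getD []).foldl (fun bp pair =>
        if pvHasA ((pvGetA bp dst).getD []) exchange &&
           ((pvGetA ((pvGetA bp dst).getD []) exchange).getD []).contains pair then
          pvUpd bp dst (fun td => pvUpd td exchange (fun l => l.erase pair))
        else bp) bp) bp
    = pvUpd bp dst (fun td =>
        keys.foldl (fun td e => pvUpd td e (fun l => l.diff ((pvGetA S e).getD []))) td) := by
  induction keys generalizing bp with
  | nil =>
    simp only [List.foldl_nil]
    exact (pvUpd_eq_self bp dst _ (fun v _ => rfl)).symm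
  | cons e ks ih =>
    simp only [List.foldl_cons]
    rw [stepExchange_eq bp src dst e S hs]
    have hs' : pvGetA (pvUpd bp dst (fun td => pvUpd td e (fun l => l.diff ((pvGetA S e).getD [])))) src = some S := by
      rw [pvGetA_pvUpd]
      simp [hne, hs]
    rw [ih _ hs', pvUpd_pvUpd]

-- the nested fold over the source entries acts entrywise on a Nodup-keyed target
lemma foldS_eq_map (S : List (String × List String)) (T : List (String × List String))
    (hndS : (S.map (·.1)).Nodup) (hndT : (T.map (·.1)).Nodup) :
    (S.map (·.1)).foldl (fun td e => pvUpd td e (fun l => l.diff ((pvGetA S e).getD []))) T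
    = T.map (fun el => (el.1, el.2.diff ((pvGetA S el.1).getD []))) := by
  induction S generalizing T with
  | nil =>
    simp only [List.map_nil, List.foldl_nil]
    have : ∀ el ∈ T, (el.1, el.2.diff ((pvGetA ([] : List (String × List String)) el.1).getD [])) = id el := by
      intro el _
      simp [pvGetA, List.diff_nil]
    rw [List.map_congr_left this, List.map_id]
  | cons hd S' ih =>
    obtain ⟨e0, ps0⟩ := hd
    simp only [List.map_cons, List.nodup_cons] at hndS
    simp only [List.map_cons, List.foldl_cons]
    have hget0 : pvGetA ((e0, ps0) :: S') e0 = some ps0 := by simp [pvGetA]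
    have hcongr : (S'.map (·.1)).foldl
        (fun td e => pvUpd td e (fun l => l.diff ((pvGetA ((e0, ps0) :: S') e).getD []))) (pvUpd T e0 (fun l => l.diff ((pvGetA ((e0, ps0) :: S') e0).getD [])))
        = (S'.map (·.1)).foldl
        (fun td e => pvUpd td e (fun l => l.diff ((pvGetA S' e).getD []))) (pvUpd T e0 (fun l => l.diff ((pvGetA ((e0, ps0) :: S') e0).getD []))) := by
      apply PySem.List.foldl_congr_mem
      intro acc e he
      have hne : ¬ e0 = e := fun hh => hndS.1 (hh ▸ he)
      rw [pvGetA]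
      simp [hne]
    rw [hcongr]
    have hndT' : ((pvUpd T e0 (fun l => l.diff ((pvGetA ((e0, ps0) :: S') e0).getD []))).map (·.1)).Nodup := by
      rw [keys_pvUpd]; exact hndT
    rw [ih _ hndS.2 hndT']
    rw [pvUpd_eq_map _ _ _ hndT, List.map_map]
    refine List.map_congr_left ?_
    intro el _
    have hS'0 : pvGetA S' e0 = none := pvGetA_none_of_not_mem S' e0 (by simpa using hndS.1)
    by_cases h1 : el.1 = e0
    · simp [Function.comp, h1, hget0, hS'0, List.diff_nil]
    · have h2 : ¬ e0 = el.1 := fun hh => h1 hh.symm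
      simp [Function.comp, h1, pvGetA_cons, h2]

-- one pass of A equals one pass of B on a Nodup blueprint
lemma passA_eq_stripB (bp : List (String × List (String × List String))) (src dst : String)
    (hne : src ≠ dst) (hpre : Pre_filter_blueprint bp) :
    filterPassA bp src dst = stripB bp src dst := by
  unfold filterPassA stripB
  cases hs : pvGetA bp src with
  | none => simp [pvHasA, hs]
  | some S =>
    cases ht : pvGetA bp dst with
    | none => simp [pvHasA, hs, ht]
    | some T =>
      rw [if_pos (by simp [pvHasA, hs, ht])]
      simp only [Option.getD_some]
      rw [passLoop_eq (S.map (·.1)) bp src dst S hne hs]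
      rw [pvUpd_congr_get bp dst _ T ht]
      have hndS : (S.map (·.1)).Nodup := hpre.2 (src, S) (mem_of_pvGetA bp src S hs)
      have hndT : (T.map (·.1)).Nodup := hpre.2 (dst, T) (mem_of_pvGetA bp dst T ht)
      rw [foldS_eq_map S T hndS hndT]
      refine congrArg _ (funext fun _ => List.map_congr_left fun el _ => ?_)
      cases hp : pvGetA S el.1 with
      | none => simp [List.diff_nil]
      | some ps => simp [purgeB_countB]

-- one pass of B preserves the Nodup precondition
lemma pre_stripB (bp : List (String × List (String × List String))) (src dst : String)
    (hpre : Pre_filter_blueprint bp) : Pre_filter_blueprint (stripB bp src dst) := by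
  unfold stripB
  cases hs : pvGetA bp src with
  | none => exact hpre
  | some S =>
    cases ht : pvGetA bp dst with
    | none => exact hpre
    | some T =>
      simp only
      rw [pvUpd_eq_map _ _ _ hpre.1]
      constructor
      · have : ∀ el ∈ bp, ((fun el : String × List (String × List String) =>
            if el.1 = dst then (dst, T.map (fun el => match pvGetA S el.1 with
              | some ps => (el.1, purgeB el.2 (countB ps))
              | none => el)) else el) el).1 = el.1 := by
          intro el _
          by_cases h1 : el.1 = dst <;> simp [h1]
        rw [List.map_map]
        simp only [Function.comp_def]
        rw [List.map_congr_left (fun el hel => this el hel)]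
        exact hpre.1
      · intro p hp
        rw [List.mem_map] at hp
        obtain ⟨el, hel, hmap⟩ := hp
        by_cases h1 : el.1 = dst
        · have hT : T = el.2 := by
            have := pvGetA_of_mem_nodup bp el.1 el.2 hpre.1 (by simpa using hel)
            rw [h1, ht] at this
            exact (Option.some.injEq _ _ ▸ this)
          simp only [if_pos h1] at hmap
          have hkeys : (p.2.map (·.1)) = (T.map (·.1)) := by
            rw [← hmap]
            simp only [List.map_map]
            refine List.map_congr_left ?_
            intro q _
            cases hq : pvGetA S q.1 <;> simp [hq]
          rw [hkeys, hT]
          exact hpre.2 el hel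
        · simp only [if_neg h1] at hmap
          rw [← hmap]
          exact hpre.2 el hel

-- ===== VERDICT (by name: the statement is the Claim_ definition above) =====
theorem filter_blueprint_spec : Claim_equal_filter_blueprint := by
  intro bp _ hpre
  unfold Spec_filter_blueprint filter_blueprint filter_blueprint_alt
  rw [passA_eq_stripB bp "maker" "trade" (by decide) hpre]
  exact passA_eq_stripB _ "taker" "quote" (by decide)
    (pre_stripB bp "maker" "trade" hpre)
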